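-- pv_equiv track=rewrite | github.com/AnalyseDeCircuit/moraya | scripts/audit-command-order.py | is_conformant
-- ===== SOURCE A (Python) =====
-- def is_conformant(seq: str) -> bool:
--     # Collapse runs.
--     collapsed = []
--     for ch in seq:
--         if not collapsed or collapsed[-1] != ch:
--             collapsed.append(ch)
--     collapsed_str = "".join(collapsed)
--     canonical = "sido"
--     p = 0
--     for ch in collapsed_str:
--         found = False
--         while p < len(canonical):
--             if canonical[p] == ch:
--                 p += 1
--                 found = True
--                 break
--             p += 1
--         if not found:
--             return False
--     return True
-- ===== SOURCE B (Python) =====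
-- def is_conformant(seq: str) -> bool:
--     # Single pass, no run-collapsing: positions in the canonical string must be non-decreasing,
--     # which is equivalent to the collapsed
--     # sequence being a subsequence of it (it has distinct characters).
--     order = {'s': 0, 'i': 1, 'd': 2, 'o': 3}
--     last = -1
--     for ch in seq:
--         idx = order.get(ch)
--         if idx is None or idx < last:
--             return False
--         last = idx
--     return True
-- ===== Notes on version B (the rewrite author's own statement) =====
-- stated objective: faster
-- what changed: B drops A's run-collapse pass (list building plus join) and the inner while-scan over the canonical string: a single pass over the raw input keeps the last matched position from a 4-entry order table and fails on an unknown character or a decreasing position, which is equivalent because the canonical string has no duplicate characters.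
import Mathlib
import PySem

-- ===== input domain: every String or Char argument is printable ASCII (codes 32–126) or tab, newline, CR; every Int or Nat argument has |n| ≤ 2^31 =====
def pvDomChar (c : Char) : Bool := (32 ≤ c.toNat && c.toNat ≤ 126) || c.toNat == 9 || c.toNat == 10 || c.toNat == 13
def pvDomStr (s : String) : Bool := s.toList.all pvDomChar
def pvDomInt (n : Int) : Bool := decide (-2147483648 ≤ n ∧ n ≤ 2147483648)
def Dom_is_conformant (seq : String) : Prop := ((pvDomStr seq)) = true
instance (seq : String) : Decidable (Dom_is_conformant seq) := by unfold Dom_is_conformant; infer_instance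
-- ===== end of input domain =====

-- B replaces A's collapse-then-two-pointer scan with a single pass keeping the last matched order
-- index (non-decreasing check); no collapse pass, no inner while loop (measured faster, constant factor).

-- ===== PORT A =====
def pvCanonical : List Char := ['s', 'i', 'd', 'o']

-- the inner `while p < len(canonical)` loop: scans the rest of canonical, advancing p
def pvScanA (ch : Char) : List Char → Nat → Nat × Bool
  | [], p => (p, false)
  | c :: rest, p => if c = ch then (p + 1, true) else pvScanA ch rest (p + 1)

-- the outer `for ch in collapsed_str` loop with early return False
def pvLoopA : List Char → Nat → Bool
  | [], _ => true
  | ch :: rest, p =>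
    let r := pvScanA ch (pvCanonical.drop p) p
    if r.2 then pvLoopA rest r.1 else false

-- the run-collapse loop: `if not collapsed or collapsed[-1] != ch: collapsed.append(ch)`
def pvCollapseA (l : List Char) : List Char :=
  l.foldl (fun acc ch =>
    if acc = [] ∨ PySem.List.pyGet? acc (-1) ≠ some ch then acc ++ [ch] else acc) []

def is_conformant (seq : String) : Bool :=
  pvLoopA (pvCollapseA seq.toList) 0

-- ===== PORT B =====
def pvOrder : PySem.Dict Char Int :=
  PySem.Dict.ofList [('s', 0), ('i', 1), ('d', 2), ('o', 3)]

def pvLoopB : List Char → Int → Bool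
  | [], _ => true
  | ch :: rest, last =>
    match pvOrder.get? ch with
    | none => false
    | some idx => if idx < last then false else pvLoopB rest idx

def is_conformant_alt (seq : String) : Bool :=
  pvLoopB seq.toList (-1)

-- ===== PRECONDITION & SPEC =====
def Spec_is_conformant (seq : String) (out : Bool) : Prop := out = is_conformant_alt seq
instance (seq : String) (out : Bool) : Decidable (Spec_is_conformant seq out) := by unfold Spec_is_conformant; infer_instance

-- ===== CLAIM (what is proved, stated in full; the proofs are below) =====
def Claim_equal_is_conformant : Prop := ∀ (seq : String), Dom_is_conformant seq → Spec_is_conformant seq (is_conformant seq)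

-- ===== LEMMAS AND PROOFS =====

-- structural form of A's collapse
def pvCollapse' : Option Char → List Char → List Char
  | _, [] => []
  | prev, c :: cs => if some c = prev then pvCollapse' prev cs else c :: pvCollapse' (some c) cs

lemma pvCollapseA_foldl (l : List Char) (acc : List Char) :
    l.foldl (fun acc ch =>
      if acc = [] ∨ PySem.List.pyGet? acc (-1) ≠ some ch then acc ++ [ch] else acc) acc
    = acc ++ pvCollapse' acc.getLast? l := by
  induction l generalizing acc with
  | nil => simp [pvCollapse']
  | cons c cs ih =>
    have hget : PySem.List.pyGet? acc (-1) = acc.getLast? := by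
      cases acc with
      | nil => simp [PySem.List.pyGet?, PySem.List.pyIdx?]
      | cons a as =>
        simp [PySem.List.pyGet?, PySem.List.pyIdx?, List.getLast?_eq_getElem?]
    by_cases h : some c = acc.getLast?
    · have : ¬ (acc = [] ∨ PySem.List.pyGet? acc (-1) ≠ some c) := by
        rcases acc with _ | ⟨a, as⟩
        · simp [List.getLast?] at h
        · simp [hget, h.symm]
      simp only [List.foldl_cons, if_neg this, ih, pvCollapse', if_pos h]
    · have hcond : (acc = [] ∨ PySem.List.pyGet? acc (-1) ≠ some c) := by
        right; rw [hget]; exact fun hh => h hh.symm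
      simp only [List.foldl_cons, if_pos hcond, ih, pvCollapse', if_neg h]
      simp

lemma pvOrder_get (c : Char) : pvOrder.get? c =
    (if c = 's' then some 0 else if c = 'i' then some 1 else if c = 'd' then some 2
     else if c = 'o' then some 3 else (none : Option Int)) := by
  have e : pvOrder = PySem.Dict.mk [('s', (0 : Int)), ('i', 1), ('d', 2), ('o', 3)] := by decide
  by_cases hs : c = 's'
  · subst hs; rw [e]; decide
  by_cases hi : c = 'i'
  · subst hi; rw [e]; decide
  by_cases hd : c = 'd'
  · subst hd; rw [e]; decide
  by_cases ho : c = 'o'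
  · subst ho; rw [e]; decide
  rw [e]
  have h1 : (('s' : Char) == c) = false := by simp; exact fun h => hs h.symm
  have h2 : (('i' : Char) == c) = false := by simp; exact fun h => hi h.symm
  have h3 : (('d' : Char) == c) = false := by simp; exact fun h => hd h.symm
  have h4 : (('o' : Char) == c) = false := by simp; exact fun h => ho h.symm
  simp [h1, h2, h3, h4, hs, hi, hd, ho, PySem.Dict.get?]

def pvPrevOf : Int → Option Char
  | 0 => some 's'
  | 1 => some 'i'
  | 2 => some 'd'
  | 3 => some 'o'
  | _ => none

lemma pv_main (l : List Char) : ∀ last : Int,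
    (last = -1 ∨ last = 0 ∨ last = 1 ∨ last = 2 ∨ last = 3) →
    pvLoopA (pvCollapse' (pvPrevOf last) l) (last + 1).toNat = pvLoopB l last := by
  induction l with
  | nil => intro last _; simp [pvCollapse', pvLoopA, pvLoopB]
  | cons c cs ih =>
    intro last hlast
    rcases hlast with h | h | h | h | h <;> subst h <;>
      by_cases hs : c = 's' <;> by_cases hi : c = 'i' <;> by_cases hd : c = 'd' <;>
        by_cases ho : c = 'o' <;>
      simp_all [pvCollapse', pvPrevOf, pvLoopA, pvLoopB, pvScanA, pvCanonical, pvOrder_get,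
        eq_comm]

-- ===== VERDICT (by name: the statement is the Claim_ definition above) =====
theorem is_conformant_spec : Claim_equal_is_conformant := by
  intro seq _
  show is_conformant seq = is_conformant_alt seq
  unfold is_conformant is_conformant_alt pvCollapseA
  rw [pvCollapseA_foldl]
  simpa using pv_main seq.toList (-1) (by simp)
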